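-- pv_equiv track=rewrite | github.com/L1uY1jun/enh_news_info | rule-based-model/util.py | rebuild_text
-- ===== SOURCE A (Python) =====
-- def rebuild_text(words):
--     result = []
--     for w in words:
--         if w == "\n":
--             result.append(w)
--         else:
--             if result and not result[-1] == "\n":
--                 result.append(" ")
--             result.append(w)
--     return ''.join(result)
-- ===== SOURCE B (Python) =====
-- def rebuild_text(words):
--     groups = []
--     current = []
--     for w in words:
--         if w == "\n":
--             groups.append(current)
--             current = []
--         else:
--             current.append(w)
--     groups.append(current)
--     return '\n'.join(' '.join(g) for g in groups)
-- ===== Notes on version B (the rewrite author's own statement) =====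
-- stated objective: alternative
-- what changed: Replaces A's inline space-insertion with a newline-guard on the last appended piece by a partition of the words into newline-separated groups followed by a two-level join.
import Mathlib
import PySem

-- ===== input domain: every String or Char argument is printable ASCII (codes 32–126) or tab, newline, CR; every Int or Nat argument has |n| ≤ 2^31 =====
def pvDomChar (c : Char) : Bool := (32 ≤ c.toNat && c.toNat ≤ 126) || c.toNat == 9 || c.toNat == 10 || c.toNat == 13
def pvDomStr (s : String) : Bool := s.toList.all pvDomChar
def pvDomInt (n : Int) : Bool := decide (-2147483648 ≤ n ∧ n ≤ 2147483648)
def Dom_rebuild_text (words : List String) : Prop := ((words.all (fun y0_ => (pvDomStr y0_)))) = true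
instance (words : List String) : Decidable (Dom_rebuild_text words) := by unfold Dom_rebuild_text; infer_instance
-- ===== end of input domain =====

-- B replaces A's inline space-insertion (guarded by the last appended piece) with a
-- partition of the words into newline-separated groups followed by a two-level join.


-- ===== PORT A =====
-- loop body: append "\n" as is; otherwise insert " " when result is nonempty and
-- its last element (result[-1]) is not "\n", then append the word
def stepA (result : List String) (w : String) : List String :=
  if w = "\n" then result ++ [w]
  else (if result ≠ [] ∧ PySem.List.pyGet? result (-1) ≠ some "\n" then result ++ [" "] else result) ++ [w]

def rebuild_text (words : List String) : String :=
  PySem.Str.join "" (words.foldl stepA [])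

-- ===== PORT B =====
-- loop body: a "\n" word closes the current group, any other word extends it
def stepB (gc : List (List String) × List String) (w : String) : List (List String) × List String :=
  if w = "\n" then (gc.1 ++ [gc.2], []) else (gc.1, gc.2 ++ [w])

def rebuild_text_alt (words : List String) : String :=
  let gc := words.foldl stepB ([], [])
  PySem.Str.join "\n" ((gc.1 ++ [gc.2]).map (PySem.Str.join " "))

-- ===== PRECONDITION & SPEC =====
def Spec_rebuild_text (words : List String) (out : String) : Prop := out = rebuild_text_alt words
instance (words : List String) (out : String) : Decidable (Spec_rebuild_text words out) := by unfold Spec_rebuild_text; infer_instance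

-- ===== CLAIM (what is proved, stated in full; the proofs are below) =====
def Claim_equal_rebuild_text : Prop := ∀ (words : List String), Dom_rebuild_text words → Spec_rebuild_text words (rebuild_text words)

-- ===== LEMMAS AND PROOFS =====

-- the list of pieces A's loop has built from groups ++ [current]
def render : List (List String) → List String
  | [] => []
  | [g] => List.intersperse " " g
  | g :: gs => List.intersperse " " g ++ "\n" :: render gs

theorem render_cons_cons (g h : List String) (gs : List (List String)) :
    render (g :: h :: gs) = List.intersperse " " g ++ "\n" :: render (h :: gs) := rfl

theorem pyGet_neg_one (xs : List String) : PySem.List.pyGet? xs (-1) = xs.getLast? := by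
  cases xs with
  | nil => rfl
  | cons a t =>
    simp [PySem.List.pyGet?, PySem.List.pyIdx?, List.getLast?_eq_getElem?]

theorem render_append_nil (l : List (List String)) (h : l ≠ []) :
    render (l ++ [[]]) = render l ++ ["\n"] := by
  induction l with
  | nil => exact absurd rfl h
  | cons g t ih =>
    cases t with
    | nil => rfl
    | cons h' t' =>
      have := ih (by simp)
      simp only [List.cons_append, render_cons_cons] at this ⊢
      rw [this]
      simp [List.append_assoc]

theorem intersperse_snoc (s w : String) (c : List String) :
    List.intersperse s (c ++ [w]) = List.intersperse s c ++ (if c = [] then [w] else [s, w]) := by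
  induction c with
  | nil => rfl
  | cons a t ih =>
    cases t with
    | nil => rfl
    | cons b t' => simp_all [List.intersperse]

theorem render_snoc_word (groups : List (List String)) (cur : List String) (w : String) :
    render (groups ++ [cur ++ [w]]) =
      render (groups ++ [cur]) ++ (if cur = [] then [w] else [" ", w]) := by
  induction groups with
  | nil => simpa [render] using intersperse_snoc " " w cur
  | cons g t ih =>
    cases t with
    | nil =>
      simp only [List.cons_append, List.nil_append, render_cons_cons, render] at ih ⊢
      rw [ih, List.append_assoc, List.cons_append]
    | cons h' t' =>
      simp only [List.cons_append, render_cons_cons] at ih ⊢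
      rw [ih, List.append_assoc]
      rfl

theorem getLast?_intersperse (s : String) (c : List String) (h : c ≠ []) :
    (List.intersperse s c).getLast? = c.getLast? ∧ List.intersperse s c ≠ [] := by
  induction c with
  | nil => exact absurd rfl h
  | cons a t ih =>
    cases t with
    | nil => simp
    | cons b t' =>
      obtain ⟨h1, h2⟩ := ih (by simp)
      refine ⟨?_, by simp [List.intersperse]⟩
      rw [show List.intersperse s (a :: b :: t') = [a, s] ++ List.intersperse s (b :: t') from rfl,
        List.getLast?_append_of_ne_nil _ h2, h1, List.getLast?_cons_cons]

theorem getLast?_render_snoc (groups : List (List String)) (cur : List String) (h : cur ≠ []) :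
    (render (groups ++ [cur])).getLast? = cur.getLast? ∧ render (groups ++ [cur]) ≠ [] := by
  induction groups with
  | nil => simpa [render] using getLast?_intersperse " " cur h
  | cons g t ih =>
    obtain ⟨h1, h2⟩ := ih
    have hsplit : render ((g :: t) ++ [cur]) =
        (List.intersperse " " g ++ ["\n"]) ++ render (t ++ [cur]) := by
      cases t <;> simp [render_cons_cons, render, List.append_assoc]
    rw [hsplit]
    exact ⟨by rw [List.getLast?_append_of_ne_nil _ h2, h1], by simp⟩

-- the guard of A's else-branch holds exactly when the current group is nonempty
theorem guard_iff (groups : List (List String)) (cur : List String) (hcur : "\n" ∉ cur) :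
    (render (groups ++ [cur]) ≠ [] ∧ (render (groups ++ [cur])).getLast? ≠ some "\n") ↔ cur ≠ [] := by
  constructor
  · rintro ⟨h1, h2⟩ rfl
    cases groups with
    | nil => exact h1 rfl
    | cons g t =>
      rw [render_append_nil _ (by simp)] at h2
      simp at h2
  · intro h
    obtain ⟨h1, h2⟩ := getLast?_render_snoc groups cur h
    refine ⟨h2, ?_⟩
    rw [h1]
    intro hc
    exact hcur (List.mem_of_getLast? hc)

-- the loop invariant: A's result list is exactly the rendering of B's (groups, current)
theorem loop_inv (ws : List String) (groups : List (List String)) (cur : List String)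
    (hcur : "\n" ∉ cur) :
    ws.foldl stepA (render (groups ++ [cur])) =
      render ((ws.foldl stepB (groups, cur)).1 ++ [(ws.foldl stepB (groups, cur)).2]) := by
  induction ws generalizing groups cur with
  | nil => rfl
  | cons w ws ih =>
    by_cases hw : w = "\n"
    · subst hw
      rw [List.foldl_cons, List.foldl_cons]
      have hA : stepA (render (groups ++ [cur])) "\n" = render ((groups ++ [cur]) ++ [[]]) := by
        rw [render_append_nil _ (by simp), stepA, if_pos rfl]
      rw [hA, show stepB (groups, cur) "\n" = (groups ++ [cur], []) from rfl]
      exact ih (groups ++ [cur]) [] (by simp)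
    · rw [List.foldl_cons, List.foldl_cons]
      have hA : stepA (render (groups ++ [cur])) w = render (groups ++ [cur ++ [w]]) := by
        rw [stepA, if_neg hw, pyGet_neg_one, render_snoc_word]
        by_cases hc : cur = []
        · rw [if_pos hc, if_neg]
          exact fun hg => (by simp [hc] : ¬ cur ≠ []) ((guard_iff groups cur hcur).mp hg)
        · rw [if_pos ((guard_iff groups cur hcur).mpr hc), if_neg hc, List.append_assoc]
          rfl
      rw [hA, show stepB (groups, cur) w = (groups, cur ++ [w]) by simp [stepB, hw]]
      refine ih groups (cur ++ [w]) ?_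
      simp only [List.mem_append, List.mem_singleton]
      exact fun hmem => hmem.elim hcur (fun h => hw h.symm)

theorem map_intersperse_str (f : String → List Char) (s : String) (l : List String) :
    (l.intersperse s).map f = (l.map f).intersperse (f s) := by
  induction l with
  | nil => rfl
  | cons a t ih => cases t <;> simp_all [List.intersperse]

theorem flatten_intersperse_nil (L : List (List Char)) :
    (L.intersperse []).flatten = L.flatten := by
  induction L with
  | nil => rfl
  | cons a t ih => cases t <;> simp_all [List.intersperse]

theorem flat_intersperse_one (g : List String) :
    (List.map String.toList (List.intersperse " " g)).flatten =
      List.intercalate [' '] (g.map String.toList) := by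
  rw [map_intersperse_str]
  rfl

theorem intercalate_cons_ne (s x : List Char) (l : List (List Char)) (h : l ≠ []) :
    List.intercalate s (x :: l) = x ++ s ++ List.intercalate s l := by
  cases l with
  | nil => exact absurd rfl h
  | cons b t => simp [List.intercalate, List.intersperse]

theorem flatten_render (gs : List (List String)) (h : gs ≠ []) :
    (List.map String.toList (render gs)).flatten =
      List.intercalate ['\n'] (gs.map (fun g => List.intercalate [' '] (g.map String.toList))) := by
  induction gs with
  | nil => exact absurd rfl h
  | cons g t ih =>
    cases t with
    | nil => simpa [render, List.intercalate, List.intersperse] using flat_intersperse_one g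
    | cons h' t' =>
      rw [render_cons_cons, List.map_append, List.map_cons, List.flatten_append,
        List.flatten_cons, ih (by simp), List.map_cons, flat_intersperse_one]
      conv_rhs => rw [List.map_cons, intercalate_cons_ne _ _ _ (by simp)]
      simp [List.append_assoc]

-- joining A's piece list with '' equals joining the groups' words with ' ' and the groups with '\n'
theorem join_render (gs : List (List String)) (h : gs ≠ []) :
    PySem.Str.join "" (render gs) = PySem.Str.join "\n" (gs.map (PySem.Str.join " ")) := by
  show String.ofList _ = String.ofList _
  rw [String.ofList_inj]
  simp only [PySem.Chars.join, List.map_map]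
  rw [show ("" : String).toList = [] from rfl,
    show List.intercalate ([] : List Char) (List.map String.toList (render gs))
      = (List.map String.toList (render gs)).flatten from flatten_intersperse_nil _,
    flatten_render gs h]
  simp only [show ("\n" : String).toList = ['\n'] from rfl]
  congr 1
  refine List.map_congr_left fun g _ => ?_
  simp [Function.comp, PySem.Str.toList_join, PySem.Chars.join]

-- ===== VERDICT (by name: the statement is the Claim_ definition above) =====
theorem rebuild_text_spec : Claim_equal_rebuild_text := by
  intro words _
  show rebuild_text words = rebuild_text_alt words
  rw [rebuild_text, rebuild_text_alt]
  have h0 : ([] : List String) = render ([] ++ [[]]) := rfl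
  rw [h0, loop_inv words [] [] (by simp)]
  exact join_render _ (by simp)
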